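-- pv_equiv track=rewrite | github.com/marisa901225-cmyk/personal-portfolio | backend/openvino_server/app.py | _apply_stop_sequences
-- ===== SOURCE A (Python) =====
-- def _apply_stop_sequences(text: str, stops: list[str]) -> tuple[str, bool]:
--     if not text or not stops:
--         return text, False
--
--     cut_idx = -1
--     for s in stops:
--         idx = text.find(s)
--         if idx == -1:
--             continue
--         if cut_idx == -1 or idx < cut_idx:
--             cut_idx = idx
--
--     if cut_idx == -1:
--         return text, False
--     return text[:cut_idx], True
-- ===== SOURCE B (Python) =====
-- def _apply_stop_sequences(text: str, stops: list[str]) -> tuple[str, bool]: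
--     if not text or not stops:
--         return text, False
--     for i in range(len(text)):
--         if any(text.startswith(s, i) for s in stops):
--             return text[:i], True
--     return text, False
-- ===== Notes on version B (the rewrite author's own statement) =====
-- stated objective: alternative
-- what changed: Replaced the per-stop text.find scan with a running minimum by a single left-to-right position scan that returns at the first index where any stop matches, maintaining no minimum.
import Mathlib
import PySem

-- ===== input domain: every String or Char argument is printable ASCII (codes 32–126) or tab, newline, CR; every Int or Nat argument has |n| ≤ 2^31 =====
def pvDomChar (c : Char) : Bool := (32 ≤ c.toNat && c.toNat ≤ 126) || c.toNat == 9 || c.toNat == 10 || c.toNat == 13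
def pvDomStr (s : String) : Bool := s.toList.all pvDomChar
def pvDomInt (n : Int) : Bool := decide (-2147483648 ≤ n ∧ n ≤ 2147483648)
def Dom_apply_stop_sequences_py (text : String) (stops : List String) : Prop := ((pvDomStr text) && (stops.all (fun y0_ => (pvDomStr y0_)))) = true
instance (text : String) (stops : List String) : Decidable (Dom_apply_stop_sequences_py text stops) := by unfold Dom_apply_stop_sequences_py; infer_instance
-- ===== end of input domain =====

-- B replaces A's per-stop text.find scan with a running minimum by a single left-to-right
-- position scan that stops at the first index where any stop matches (objective: alternative).

-- ===== PORT A =====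
-- one fold step of A's 'for s in stops' loop updating cut_idx
def pvStepA (t : List Char) (cut : Int) (s : String) : Int :=
  let idx := PySem.Chars.find t s.toList
  if idx = -1 then cut
  else if cut = -1 ∨ idx < cut then idx else cut

def apply_stop_sequences_py (text : String) (stops : List String) : String × Bool :=
  if text.toList = [] ∨ stops = [] then (text, false)
  else
    let cut := stops.foldl (pvStepA text.toList) (-1)
    if cut = -1 then (text, false)
    else (String.ofList (PySem.List.slice text.toList none (some cut)), true)  -- text[:cut_idx]

-- ===== PORT B =====
-- B's 'for i in range(len(text)): if any(text.startswith(s, i) …): return text[:i], True'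
-- as the first index of List.range passing the any-test; text.startswith(s, i) for
-- 0 ≤ i ≤ len(text) is exactly startswith of the i-dropped text.
def apply_stop_sequences_py_alt (text : String) (stops : List String) : String × Bool :=
  if text.toList = [] ∨ stops = [] then (text, false)
  else
    match (List.range text.toList.length).find?
        (fun i => stops.any (fun s => PySem.Chars.startswith (text.toList.drop i) s.toList)) with
    | some i => (String.ofList (text.toList.take i), true)   -- text[:i]
    | none => (text, false)

-- ===== PRECONDITION & SPEC =====
def Spec_apply_stop_sequences_py (text : String) (stops : List String) (out : String × Bool) : Prop := out = apply_stop_sequences_py_alt text stops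
instance (text : String) (stops : List String) (out : String × Bool) : Decidable (Spec_apply_stop_sequences_py text stops out) := by unfold Spec_apply_stop_sequences_py; infer_instance

-- ===== CLAIM (what is proved, stated in full; the proofs are below) =====
def Claim_equal_apply_stop_sequences_py : Prop := ∀ (text : String) (stops : List String), Dom_apply_stop_sequences_py text stops → Spec_apply_stop_sequences_py text stops (apply_stop_sequences_py text stops)

-- ===== LEMMAS AND PROOFS =====

-- characterization of A's fold: the result is -1 with no accumulator change exactly when
-- every stop's find is -1; otherwise it is one of the finds (or the accumulator) and a
-- lower bound on every successful find.
theorem pvFoldA_spec (t : List Char) (stops : List String) (acc : Int) (hacc : -1 ≤ acc) :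
    -1 ≤ stops.foldl (pvStepA t) acc ∧
    (stops.foldl (pvStepA t) acc = acc ∨
      ∃ s ∈ stops, stops.foldl (pvStepA t) acc = PySem.Chars.find t s.toList) ∧
    (stops.foldl (pvStepA t) acc ≤ acc ∨ acc = -1) ∧
    (∀ s ∈ stops, PySem.Chars.find t s.toList = -1 ∨
      stops.foldl (pvStepA t) acc ≤ PySem.Chars.find t s.toList) ∧
    (stops.foldl (pvStepA t) acc = -1 →
      acc = -1 ∧ ∀ s ∈ stops, PySem.Chars.find t s.toList = -1) := by
  induction stops generalizing acc with
  | nil => simp; omega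
  | cons s rest ih =>
    have hfind := PySem.Chars.neg_one_le_find t s.toList
    have hstep : -1 ≤ pvStepA t acc s := by
      unfold pvStepA; dsimp only; split_ifs <;> omega
    have hA : pvStepA t acc s = acc ∨ pvStepA t acc s = PySem.Chars.find t s.toList := by
      unfold pvStepA; dsimp only; split_ifs <;> simp
    have hle : PySem.Chars.find t s.toList ≠ -1 →
        pvStepA t acc s ≤ PySem.Chars.find t s.toList ∧ 0 ≤ pvStepA t acc s := by
      unfold pvStepA; dsimp only; split_ifs <;> omega
    have hle2 : acc ≠ -1 → pvStepA t acc s ≤ acc := by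
      unfold pvStepA; dsimp only; split_ifs <;> omega
    have hneg : pvStepA t acc s = -1 → acc = -1 ∧ PySem.Chars.find t s.toList = -1 := by
      unfold pvStepA; dsimp only; split_ifs <;> omega
    rw [List.foldl_cons]
    obtain ⟨h1, h2, h3, h4, h5⟩ := ih (pvStepA t acc s) hstep
    refine ⟨h1, ?_, ?_, ?_, ?_⟩
    · rcases h2 with h | ⟨s', hs', h⟩
      · rcases hA with h' | h'
        · left; omega
        · right; exact ⟨s, List.mem_cons_self .., by omega⟩
      · right; exact ⟨s', List.mem_cons_of_mem _ hs', h⟩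
    · by_cases hacc' : acc = -1
      · right; exact hacc'
      · left
        have := hle2 hacc'
        rcases h3 with h | h
        · omega
        · obtain ⟨h', -⟩ := hneg h; omega
    · intro s' hs'
      rcases List.mem_cons.mp hs' with rfl | hmem
      · by_cases hf : PySem.Chars.find t s'.toList = -1
        · left; exact hf
        · right
          obtain ⟨hle', hpos'⟩ := hle hf
          rcases h3 with h | h <;> omega
      · exact h4 s' hmem
    · intro h
      obtain ⟨hstep0, hall⟩ := h5 h
      obtain ⟨hacc0, hf0⟩ := hneg hstep0
      exact ⟨hacc0, fun s' hs' => by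
        rcases List.mem_cons.mp hs' with rfl | hmem
        · exact hf0
        · exact hall s' hmem⟩

-- find? over List.range returns exactly the least index passing the predicate
theorem pvFindRange_eq_some (p : Nat → Bool) (n i : Nat) (hi : i < n) (hp : p i = true)
    (hmin : ∀ j < i, p j = false) : (List.range n).find? p = some i := by
  induction n with
  | zero => omega
  | succ n ih =>
    rw [List.range_succ, List.find?_append]
    by_cases h : i < n
    · rw [ih h, Option.some_or]
    · have hin : i = n := by omega
      have : (List.range n).find? p = none := by
        rw [List.find?_eq_none]
        intro x hx
        simp only [List.mem_range] at hx
        simp [hmin x (by omega)]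
      rw [this, Option.none_or]
      subst hin
      simp [hp]

-- the B predicate holds at j iff some stop is a prefix of the j-dropped text
theorem pvPred_iff (t : List Char) (stops : List String) (j : Nat) :
    stops.any (fun s => PySem.Chars.startswith (t.drop j) s.toList) = true ↔
      ∃ s ∈ stops, s.toList <+: t.drop j := by
  simp only [List.any_eq_true, PySem.Chars.startswith_iff]

-- ===== VERDICT (by name: the statement is the Claim_ definition above) =====
theorem apply_stop_sequences_py_spec : Claim_equal_apply_stop_sequences_py := by
  intro text stops _
  unfold Spec_apply_stop_sequences_py apply_stop_sequences_py apply_stop_sequences_py_alt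
  by_cases hguard : text.toList = [] ∨ stops = []
  · rw [if_pos hguard, if_pos hguard]
  · rw [if_neg hguard, if_neg hguard]
    obtain ⟨htext, hstops⟩ := not_or.mp hguard
    set t := text.toList with ht
    obtain ⟨hF1, hF2, -, hF4, hF5⟩ := pvFoldA_spec t stops (-1) le_rfl
    set F := stops.foldl (pvStepA t) (-1) with hFdef
    by_cases hF : F = -1
    · -- no stop occurs anywhere: both return (text, false)
      obtain ⟨-, hall⟩ := hF5 hF
      have hnone : (List.range t.length).find?
          (fun i => stops.any (fun s => PySem.Chars.startswith (t.drop i) s.toList)) = none := by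
        rw [List.find?_eq_none]
        intro j _
        simp only [Bool.not_eq_true]
        by_contra h
        rw [Bool.not_eq_false, pvPred_iff] at h
        obtain ⟨s, hs, hpre⟩ := h
        have : PySem.Chars.isIn s.toList t = true :=
          (PySem.Chars.exists_prefix_drop_iff_isIn s.toList t).mp ⟨j, hpre⟩
        have := (PySem.Chars.isIn_iff_infix s.toList t).mp this
        exact ((PySem.Chars.find_eq_neg_one_iff t s.toList).mp (hall s hs)) this
      simp [hF, hnone]
    · -- some stop occurs: A's minimum find F is B's first matching position
      have hF0 : 0 ≤ F := by omega
      obtain ⟨s0, hs0, hFs0⟩ : ∃ s ∈ stops, F = PySem.Chars.find t s.toList := by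
        rcases hF2 with h | h
        · omega
        · exact h
      have hfind0 : 0 ≤ PySem.Chars.find t s0.toList := by omega
      obtain ⟨hpre0, hmin0⟩ := PySem.Chars.find_spec hfind0
      rw [← hFs0] at hpre0 hmin0
      -- F < length t
      have hlt : F.toNat < t.length := by
        by_contra h
        have hlen : F ≤ (t.length : Int) := hFs0 ▸ PySem.Chars.find_le_length t s0.toList
        have heq : F.toNat = t.length := by omega
        rw [heq, List.drop_length] at hpre0
        have : s0.toList = [] := List.prefix_nil.mp hpre0
        have : PySem.Chars.find t s0.toList = 0 := this ▸ PySem.Chars.find_nil t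
        have ht0 : 0 < t.length := List.length_pos_iff.mpr htext
        omega
      -- B's find? returns F.toNat
      have hsome : (List.range t.length).find?
          (fun i => stops.any (fun s => PySem.Chars.startswith (t.drop i) s.toList)) = some F.toNat := by
        apply pvFindRange_eq_some _ _ _ hlt
        · exact (pvPred_iff t stops F.toNat).mpr ⟨s0, hs0, hpre0⟩
        · intro j hj
          by_contra h
          rw [Bool.not_eq_false, pvPred_iff] at h
          obtain ⟨s, hs, hpre⟩ := h
          have hin : PySem.Chars.isIn s.toList t = true :=
            (PySem.Chars.exists_prefix_drop_iff_isIn s.toList t).mp ⟨j, hpre⟩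
          have hinf := (PySem.Chars.isIn_iff_infix s.toList t).mp hin
          have hfne : PySem.Chars.find t s.toList ≠ -1 :=
            fun hc => ((PySem.Chars.find_eq_neg_one_iff t s.toList).mp hc) hinf
          have hFle : F ≤ PySem.Chars.find t s.toList := by
            rcases hF4 s hs with h | h
            · exact absurd h hfne
            · exact h
          have hfge0 : 0 ≤ PySem.Chars.find t s.toList := by
            have := PySem.Chars.neg_one_le_find t s.toList; omega
          obtain ⟨-, hminS⟩ := PySem.Chars.find_spec hfge0
          -- s is a prefix at j, so find(s) ≤ j, so F ≤ j < F.toNat: contradiction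
          have : ¬ j < (PySem.Chars.find t s.toList).toNat := fun hc => hminS j hc hpre
          omega
      rw [hsome]
      simp [hF, PySem.List.slice_to t hF0]

-- (end of file)
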